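-- pv_equiv track=rewrite | github.com/chensy98/deepmd-kit | deepmd/pt/optimizer/LKF.py | distribute_indices
-- ===== SOURCE A (Python) =====
-- def distribute_indices(total_length, num_workers):
--     indices_per_worker = total_length // num_workers
--     remainder = total_length % num_workers
--
--     indices = []
--     start = 0
--
--     for i in range(num_workers):
--         end = start + indices_per_worker + (1 if i < remainder else 0)
--         indices.append((start, end))
--         start = end
--
--     return indices, remainder
-- ===== SOURCE B (Python) =====
-- def distribute_indices(total_length, num_workers):
--     indices_per_worker = total_length // num_workers
--     remainder = total_length % num_workers
--     indices = [
--         (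
--             i * indices_per_worker + min(i, remainder),
--             i * indices_per_worker + min(i, remainder)
--             + indices_per_worker
--             + (1 if i < remainder else 0),
--         )
--         for i in range(num_workers)
--     ]
--     return indices, remainder
-- ===== Notes on version B (the rewrite author's own statement) =====
-- stated objective: alternative
-- what changed: Replaces the sequential start=end accumulator loop with a stateless comprehension computing each interval independently from the closed form start = i*indices_per_worker + min(i, remainder).
import Mathlib
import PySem

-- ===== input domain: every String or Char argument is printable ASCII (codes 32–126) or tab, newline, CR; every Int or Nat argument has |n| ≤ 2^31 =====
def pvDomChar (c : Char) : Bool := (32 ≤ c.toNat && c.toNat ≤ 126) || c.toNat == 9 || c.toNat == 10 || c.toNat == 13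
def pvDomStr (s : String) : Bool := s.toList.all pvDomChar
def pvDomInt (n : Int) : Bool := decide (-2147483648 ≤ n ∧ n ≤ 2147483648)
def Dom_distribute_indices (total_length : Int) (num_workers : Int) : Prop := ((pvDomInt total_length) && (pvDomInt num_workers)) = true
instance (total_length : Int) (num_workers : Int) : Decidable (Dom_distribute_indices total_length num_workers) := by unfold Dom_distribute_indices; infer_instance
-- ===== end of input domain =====

-- B replaces A's sequential start=end accumulator with a stateless closed form per interval (alternative decomposition, same cost).

-- ===== PORT A =====
def distribute_indices (total_length : Int) (num_workers : Int) : (List (Int × Int)) × Int :=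
  let indices_per_worker := PySem.Int.floordiv total_length num_workers
  let remainder := PySem.Int.mod total_length num_workers
  let st := (PySem.List.pyRange 0 num_workers 1).foldl
    (fun (acc : List (Int × Int) × Int) i =>
      let e := acc.2 + indices_per_worker + (if i < remainder then 1 else 0)
      (acc.1 ++ [(acc.2, e)], e))
    ([], 0)
  (st.1, remainder)

-- ===== PORT B =====
def distribute_indices_alt (total_length : Int) (num_workers : Int) : (List (Int × Int)) × Int :=
  let q := PySem.Int.floordiv total_length num_workers
  let r := PySem.Int.mod total_length num_workers
  ((PySem.List.pyRange 0 num_workers 1).map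
    (fun i => (i * q + min i r, i * q + min i r + q + (if i < r then 1 else 0))), r)

-- ===== PRECONDITION & SPEC =====
-- Pre_ excludes num_workers = 0, where Python A raises ZeroDivisionError.
def Pre_distribute_indices (total_length : Int) (num_workers : Int) : Prop := num_workers ≠ 0
instance (total_length : Int) (num_workers : Int) : Decidable (Pre_distribute_indices total_length num_workers) := by unfold Pre_distribute_indices; infer_instance
def pvWitness_distribute_indices : Int × Int := (10, 3)

def Spec_distribute_indices (total_length : Int) (num_workers : Int) (out : (List (Int × Int)) × Int) : Prop := out = distribute_indices_alt total_length num_workers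
instance (total_length : Int) (num_workers : Int) (out : (List (Int × Int)) × Int) : Decidable (Spec_distribute_indices total_length num_workers out) := by unfold Spec_distribute_indices; infer_instance

-- ===== CLAIM (what is proved, stated in full; the proofs are below) =====
def Claim_equal_distribute_indices : Prop := ∀ (total_length : Int) (num_workers : Int), Dom_distribute_indices total_length num_workers → Pre_distribute_indices total_length num_workers → Spec_distribute_indices total_length num_workers (distribute_indices total_length num_workers)

-- ===== LEMMAS AND PROOFS =====

-- Loop invariant: after the first m iterations, A's accumulator is B's map over the
-- same prefix and the running start equals the closed form m*q + min m r.
theorem pv_loop_inv (q r : Int) (hr : 0 ≤ r) (m : Nat) :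
    (PySem.List.pyRange 0 (m : Int) 1).foldl
      (fun (acc : List (Int × Int) × Int) i =>
        let e := acc.2 + q + (if i < r then 1 else 0)
        (acc.1 ++ [(acc.2, e)], e))
      ([], 0)
    = ((PySem.List.pyRange 0 (m : Int) 1).map
        (fun i => (i * q + min i r, i * q + min i r + q + (if i < r then 1 else 0))),
       (m : Int) * q + min (m : Int) r) := by
  induction m with
  | zero => simp [PySem.List.pyRange_one_eq_nil, hr]
  | succ m ih =>
    have h : PySem.List.pyRange 0 ((m + 1 : Nat) : Int) 1
        = PySem.List.pyRange 0 (m : Int) 1 ++ [(m : Int)] := by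
      have := PySem.List.pyRange_one_succ_right (a := 0) (b := (m : Int)) (by positivity)
      push_cast
      push_cast at this
      exact this
    rw [h, List.foldl_append, ih, List.map_append]
    simp only [List.foldl_cons, List.foldl_nil, List.map_cons, List.map_nil]
    refine Prod.ext rfl ?_
    push_cast
    rw [add_one_mul]
    omega

theorem distribute_indices_eq_alt (total_length num_workers : Int) :
    distribute_indices total_length num_workers = distribute_indices_alt total_length num_workers := by
  unfold distribute_indices distribute_indices_alt
  by_cases h : 0 < num_workers
  · have hm : num_workers = ((num_workers.toNat : Nat) : Int) := by omega
    have hr : 0 ≤ PySem.Int.mod total_length num_workers :=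
      PySem.Int.mod_nonneg (a := total_length) h
    dsimp only
    rw [hm] at hr ⊢
    rw [pv_loop_inv _ _ hr]
  · rw [PySem.List.pyRange_one_eq_nil (by omega)]
    simp

-- ===== VERDICT (by name: the statement is the Claim_ definition above) =====
theorem distribute_indices_spec : Claim_equal_distribute_indices := by
  intro tl nw _ _
  exact distribute_indices_eq_alt tl nw
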